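-- pv_equiv track=rewrite | github.com/yangyuan16/QC-alpha-circuit | library/circuit.py | circjob_count_nq
-- ===== SOURCE A (Python) =====
-- def circjob_count_nq(counts,nbody):
--     # nbody 比特数目
--     counts_new={} # 相当于要补全所有测量到的比特排列的信息
--     for it in range(2**nbody):
--         A = format(it, 'b').zfill(nbody)
--         if A in counts:
--             counts_new[A] = counts[A]
--         else:
--             counts_new[A] = 0
--     return counts_new
-- ===== SOURCE B (Python) =====
-- def circjob_count_nq(counts, nbody):
--     # Generate the 2**nbody bitstrings by recursive doubling (prepending '0'
--     # then '1'), instead of formatting each integer of range(2**nbody) in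
--     # binary; then fill each entry from counts in one dict comprehension.
--     keys = ['']
--     for _ in range(nbody):
--         keys = ['0' + s for s in keys] + ['1' + s for s in keys]
--     return {k: counts.get(k, 0) for k in keys}
-- ===== Notes on version B (the rewrite author's own statement) =====
-- stated objective: alternative
-- what changed: B generates the 2**nbody bitstrings by recursive doubling (prepending '0' and '1' to the previous generation) instead of formatting each integer of range(2**nbody) in binary and zfill-padding it, and fills values with a single dict comprehension using counts.get.
-- intended difference: For nbody = 0 A returns {'0': counts.get('0',0)} because format(0,'b') is '0' even before padding, while B returns {'': counts.get('',0)}, the single empty bitstring of length 0, which is the intended 2^0-entry table. — e.g. on circjob_count_nq([], 0): A returns [("0", 0)], B returns [("", 0)]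
import Mathlib
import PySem

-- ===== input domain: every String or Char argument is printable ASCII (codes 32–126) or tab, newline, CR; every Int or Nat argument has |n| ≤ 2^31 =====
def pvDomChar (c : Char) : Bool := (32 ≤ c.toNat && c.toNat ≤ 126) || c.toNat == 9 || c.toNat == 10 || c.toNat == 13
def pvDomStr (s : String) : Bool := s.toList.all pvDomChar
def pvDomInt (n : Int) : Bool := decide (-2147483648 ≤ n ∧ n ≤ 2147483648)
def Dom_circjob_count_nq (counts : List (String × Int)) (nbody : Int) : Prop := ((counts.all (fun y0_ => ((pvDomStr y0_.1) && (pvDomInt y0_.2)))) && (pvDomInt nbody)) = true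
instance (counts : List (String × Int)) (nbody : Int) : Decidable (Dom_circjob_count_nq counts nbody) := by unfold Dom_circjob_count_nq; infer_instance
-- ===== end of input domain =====

-- B generates the 2^nbody bitstrings by recursive doubling (prepend '0' / '1') instead of
-- formatting each integer of range(2**nbody) in binary; same cost, different generation scheme.


-- ===== PORT A =====
-- binAux m acc prepends the binary digits of m (MSB first) to acc; exact for m > 0.
def binAux (m : Nat) (acc : List Char) : List Char :=
  if h : m = 0 then acc
  else binAux (m / 2) ((if m % 2 = 1 then '1' else '0') :: acc)
  decreasing_by exact Nat.div_lt_self (Nat.pos_of_ne_zero h) (by omega)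

-- format(m, 'b') for m ≥ 0 (the only values reached here: it ranges over range(2**nbody)).
def natToBin (m : Nat) : List Char := if m = 0 then ['0'] else binAux m []

-- format(it, 'b').zfill(nbody); exact for it ≥ 0 (zfill pads with '0' on the left).
def padbin (it : Int) (nbody : Int) : String :=
  let s := natToBin it.toNat
  String.ofList (List.replicate (nbody.toNat - s.length) '0' ++ s)

def circjob_count_nq (counts : List (String × Int)) (nbody : Int) : List (String × Int) :=
  let d := PySem.Dict.mk counts
  ((PySem.List.pyRange 0 ((2 : Int) ^ nbody.toNat) 1).foldl
    (fun acc it =>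
      let A := padbin it nbody
      if d.contains A then acc.insert A (d.getD A 0) else acc.insert A 0)
    PySem.Dict.empty).items

-- ===== PORT B =====
-- Strings are built as List Char (PySem.Chars convention) and converted with String.ofList;
-- '0' + s / '1' + s is the cons; counts.get(k, 0) is getD; the dict comprehension is a fold of inserts.
def circjob_count_nq_alt (counts : List (String × Int)) (nbody : Int) : List (String × Int) :=
  let d := PySem.Dict.mk counts
  let keys := (List.range nbody.toNat).foldl
    (fun ks _ => ks.map (fun s => '0' :: s) ++ ks.map (fun s => '1' :: s)) [([] : List Char)]
  (keys.foldl (fun acc k => acc.insert (String.ofList k) (d.getD (String.ofList k) 0))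
    PySem.Dict.empty).items

-- ===== PRECONDITION & SPEC =====
-- Python A raises TypeError when nbody < 0 (2**nbody is then a float, so range() raises).
def Pre_circjob_count_nq (counts : List (String × Int)) (nbody : Int) : Prop := 0 ≤ nbody
instance (counts : List (String × Int)) (nbody : Int) : Decidable (Pre_circjob_count_nq counts nbody) := by unfold Pre_circjob_count_nq; infer_instance
def pvWitness_circjob_count_nq : (List (String × Int)) × Int := ([("1", 5)], 1)

-- For nbody = 0 A returns {'0': counts.get('0',0)} because format(0,'b') is '0' even before
-- padding, while B returns {'': counts.get('',0)}, the single empty bitstring of length 0,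
-- which is the intended 2^0-entry table.
def D_circjob_count_nq (counts : List (String × Int)) (nbody : Int) : Prop := nbody = 0
instance (counts : List (String × Int)) (nbody : Int) : Decidable (D_circjob_count_nq counts nbody) := by unfold D_circjob_count_nq; infer_instance

def Spec_circjob_count_nq (counts : List (String × Int)) (nbody : Int) (out : List (String × Int)) : Prop := ¬ D_circjob_count_nq counts nbody → out = circjob_count_nq_alt counts nbody
instance (counts : List (String × Int)) (nbody : Int) (out : List (String × Int)) : Decidable (Spec_circjob_count_nq counts nbody out) := by unfold Spec_circjob_count_nq; infer_instance

def pvDiffWitness_circjob_count_nq : (List (String × Int)) × Int := ([], 0)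
def pvDiffWitnessOut_circjob_count_nq : (List (String × Int)) × (List (String × Int)) := ([("0", 0)], [("", 0)])

-- ===== CLAIM (what is proved, stated in full; the proofs are below) =====
def Claim_unchanged_circjob_count_nq : Prop := ∀ (counts : List (String × Int)) (nbody : Int), Dom_circjob_count_nq counts nbody → Pre_circjob_count_nq counts nbody → Spec_circjob_count_nq counts nbody (circjob_count_nq counts nbody)
def Claim_changed_circjob_count_nq : Prop := Dom_circjob_count_nq (pvDiffWitness_circjob_count_nq.1) (pvDiffWitness_circjob_count_nq.2) ∧ Pre_circjob_count_nq (pvDiffWitness_circjob_count_nq.1) (pvDiffWitness_circjob_count_nq.2) ∧ D_circjob_count_nq (pvDiffWitness_circjob_count_nq.1) (pvDiffWitness_circjob_count_nq.2) ∧ circjob_count_nq (pvDiffWitness_circjob_count_nq.1) (pvDiffWitness_circjob_count_nq.2) = pvDiffWitnessOut_circjob_count_nq.1 ∧ circjob_count_nq_alt (pvDiffWitness_circjob_count_nq.1) (pvDiffWitness_circjob_count_nq.2) = pvDiffWitnessOut_circjob_count_nq.2 ∧ pvDiffWitnessOut_circjob_count_nq.1 ≠ pvDiffWitnessOut_ci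rcjob_count_nq.2
def Claim_exact_circjob_count_nq : Prop := ∀ (counts : List (String × Int)) (nbody : Int), Dom_circjob_count_nq counts nbody → Pre_circjob_count_nq counts nbody → D_circjob_count_nq counts nbody → circjob_count_nq counts nbody ≠ circjob_count_nq_alt counts nbody

-- ===== LEMMAS AND PROOFS =====

-- value of a binary char list read MSB-first
def binVal (cs : List Char) : Nat :=
  cs.foldl (fun acc c => 2 * acc + (if c = '1' then 1 else 0)) 0

theorem binVal_foldl (cs : List Char) (a : Nat) :
    cs.foldl (fun acc c => 2 * acc + (if c = '1' then 1 else 0)) a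
      = a * 2 ^ cs.length + binVal cs := by
  induction cs generalizing a with
  | nil => simp [binVal]
  | cons c cs ih =>
    simp only [List.foldl_cons, List.length_cons, binVal] at *
    rw [ih, ih (2 * 0 + _)]
    ring

theorem binVal_cons (c : Char) (cs : List Char) :
    binVal (c :: cs) = (if c = '1' then 1 else 0) * 2 ^ cs.length + binVal cs := by
  simp only [binVal, List.foldl_cons]
  have := binVal_foldl cs (2 * 0 + if c = '1' then 1 else 0)
  simpa using this

theorem binVal_lt (cs : List Char) : binVal cs < 2 ^ cs.length := by
  induction cs with
  | nil => simp [binVal]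
  | cons c cs ih =>
    rw [binVal_cons, List.length_cons, pow_succ]
    split_ifs <;> omega

theorem binVal_binAux (m : Nat) : ∀ acc, binVal (binAux m acc) = m * 2 ^ acc.length + binVal acc := by
  induction m using Nat.strong_induction_on with
  | _ m ih =>
    intro acc
    unfold binAux
    split
    · simp [*]
    · rename_i h
      rw [ih (m / 2) (Nat.div_lt_self (Nat.pos_of_ne_zero h) (by omega))]
      have hc : binVal ((if m % 2 = 1 then '1' else '0') :: acc)
          = m % 2 * 2 ^ acc.length + binVal acc := by
        rw [binVal_cons]
        have : m % 2 < 2 := Nat.mod_lt _ (by omega)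
        interval_cases h2 : m % 2 <;> simp
      rw [hc]
      simp only [List.length_cons, pow_succ]
      have hm : m / 2 * 2 + m % 2 = m := by omega
      calc m / 2 * (2 ^ acc.length * 2) + (m % 2 * 2 ^ acc.length + binVal acc)
          = (m / 2 * 2 + m % 2) * 2 ^ acc.length + binVal acc := by ring
        _ = m * 2 ^ acc.length + binVal acc := by rw [hm]

theorem binVal_natToBin (m : Nat) : binVal (natToBin m) = m := by
  unfold natToBin
  split
  · simp [binVal, *]
  · rw [binVal_binAux]; simp [binVal]

theorem binVal_replicate_append (z : Nat) (s : List Char) :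
    binVal (List.replicate z '0' ++ s) = binVal s := by
  induction z with
  | zero => simp
  | succ z ih => simpa [List.replicate_succ, binVal] using ih

theorem padbin_inj {a b : Int} (ha : 0 ≤ a) (hb : 0 ≤ b) (n : Int)
    (h : padbin a n = padbin b n) : a = b := by
  unfold padbin at h
  have h' := congrArg (fun s => binVal s.toList) h
  simp only [String.toList_ofList, binVal_replicate_append] at h'
  rw [binVal_natToBin, binVal_natToBin] at h'
  omega

-- binary-digit character predicates
theorem binAux_bin (m : Nat) : ∀ acc, (∀ c ∈ acc, c = '0' ∨ c = '1') →
    ∀ c ∈ binAux m acc, c = '0' ∨ c = '1' := by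
  induction m using Nat.strong_induction_on with
  | _ m ih =>
    intro acc hacc
    unfold binAux
    split
    · exact hacc
    · rename_i h
      refine ih (m / 2) (Nat.div_lt_self (Nat.pos_of_ne_zero h) (by omega)) _ ?_
      intro c hc
      rcases List.mem_cons.mp hc with hc | hc
      · subst hc; split_ifs <;> simp
      · exact hacc c hc

theorem natToBin_bin (m : Nat) : ∀ c ∈ natToBin m, c = '0' ∨ c = '1' := by
  unfold natToBin
  split
  · simp
  · exact binAux_bin m [] (by simp)

theorem binVal_inj : ∀ (cs ds : List Char), (∀ c ∈ cs, c = '0' ∨ c = '1') →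
    (∀ c ∈ ds, c = '0' ∨ c = '1') → cs.length = ds.length → binVal cs = binVal ds → cs = ds := by
  intro cs
  induction cs with
  | nil =>
    intro ds _ _ hl _
    cases ds with
    | nil => rfl
    | cons d ds => simp at hl
  | cons c cs ih =>
    intro ds hcs hds hl hv
    cases ds with
    | nil => simp at hl
    | cons d ds =>
      have hL : cs.length = ds.length := by simpa using hl
      rw [binVal_cons, binVal_cons, hL] at hv
      have h1 := binVal_lt cs
      have h2 := binVal_lt ds
      rw [hL] at h1
      have hc := hcs c (by simp)
      have hd := hds d (by simp)
      have hcd : c = d ∧ binVal cs = binVal ds := by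
        rcases hc with hc | hc <;> rcases hd with hd | hd <;> subst hc <;> subst hd
        · exact ⟨rfl, by simpa using hv⟩
        · exfalso; simp at hv; omega
        · exfalso; simp at hv; omega
        · exact ⟨rfl, by simp only [reduceIte] at hv; omega⟩
      refine hcd.1 ▸ congrArg _ ?_
      exact ih ds (fun x hx => hcs x (by simp [hx])) (fun x hx => hds x (by simp [hx])) hL hcd.2

theorem binAux_length_le (m : Nat) : ∀ (n : Nat) (acc : List Char), m < 2 ^ n →
    (binAux m acc).length ≤ n + acc.length := by
  induction m using Nat.strong_induction_on with
  | _ m ih =>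
    intro n acc hm
    unfold binAux
    split
    · omega
    · rename_i h
      have hn : n ≠ 0 := by
        intro h0; subst h0; simp at hm; omega
      obtain ⟨n', rfl⟩ := Nat.exists_eq_succ_of_ne_zero hn
      have hm2 : m / 2 < 2 ^ n' := by
        have : (2 : Nat) ^ (n' + 1) = 2 * 2 ^ n' := by ring
        omega
      have := ih (m / 2) (Nat.div_lt_self (Nat.pos_of_ne_zero h) (by omega))
        n' ((if m % 2 = 1 then '1' else '0') :: acc) hm2
      simpa [Nat.succ_add] using this

theorem natToBin_length_le {n i : Nat} (hn : 1 ≤ n) (hi : i < 2 ^ n) :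
    (natToBin i).length ≤ n := by
  unfold natToBin
  split
  · simpa using hn
  · simpa using binAux_length_le i n [] hi

-- bitsM n i : the n-bit MSB-first binary representation of i (mod 2^n)
def bitsM : Nat → Nat → List Char
  | 0, _ => []
  | n + 1, i => (if i < 2 ^ n then '0' else '1') :: bitsM n (i % 2 ^ n)

theorem length_bitsM (n : Nat) : ∀ i, (bitsM n i).length = n := by
  induction n with
  | zero => intro i; rfl
  | succ n ih => intro i; simp [bitsM, ih]

theorem bitsM_bin (n : Nat) : ∀ i, ∀ c ∈ bitsM n i, c = '0' ∨ c = '1' := by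
  induction n with
  | zero => simp [bitsM]
  | succ n ih =>
    intro i c hc
    rcases List.mem_cons.mp hc with hc | hc
    · subst hc; split_ifs <;> simp
    · exact ih _ c hc

theorem binVal_bitsM (n : Nat) : ∀ i, i < 2 ^ n → binVal (bitsM n i) = i := by
  induction n with
  | zero => intro i hi; interval_cases i; rfl
  | succ n ih =>
    intro i hi
    have hp : (0 : Nat) < 2 ^ n := Nat.two_pow_pos n
    have hmod : i % 2 ^ n < 2 ^ n := Nat.mod_lt _ hp
    rw [bitsM, binVal_cons, length_bitsM, ih _ hmod]
    have h2 : (2 : Nat) ^ (n + 1) = 2 * 2 ^ n := by ring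
    by_cases hlt : i < 2 ^ n
    · rw [if_pos hlt, Nat.mod_eq_of_lt hlt]
      norm_num
      decide
    · rw [if_neg hlt]
      norm_num
      have hsub : i % 2 ^ n = i - 2 ^ n := by
        rw [Nat.mod_eq_sub_mod (by omega)]
        exact Nat.mod_eq_of_lt (by omega)
      rw [hsub]
      omega

-- the key list B builds (the fold in the port), and its characterisation
def bkeys (n : Nat) : List (List Char) :=
  (List.range n).foldl
    (fun ks _ => ks.map (fun s => '0' :: s) ++ ks.map (fun s => '1' :: s)) [([] : List Char)]

theorem bkeys_succ (n : Nat) :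
    bkeys (n + 1) = (bkeys n).map (fun s => '0' :: s) ++ (bkeys n).map (fun s => '1' :: s) := by
  unfold bkeys
  rw [List.range_succ, List.foldl_append]
  rfl

theorem bkeys_eq (n : Nat) : bkeys n = (List.range (2 ^ n)).map (bitsM n) := by
  induction n with
  | zero => rfl
  | succ n ih =>
    rw [bkeys_succ, ih]
    have hsplit : (2 : Nat) ^ (n + 1) = 2 ^ n + 2 ^ n := by ring
    rw [hsplit, List.range_add, List.map_append, List.map_map, List.map_map, List.map_map]
    congr 1
    · refine List.map_congr_left ?_
      intro i hi
      have hi' : i < 2 ^ n := List.mem_range.mp hi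
      simp [bitsM, hi', Nat.mod_eq_of_lt hi']
    · refine List.map_congr_left ?_
      intro j hj
      have hj' : j < 2 ^ n := List.mem_range.mp hj
      have h1 : ¬ (2 ^ n + j < 2 ^ n) := by omega
      have h2 : (2 ^ n + j) % 2 ^ n = j := by
        rw [Nat.add_mod_left]
        exact Nat.mod_eq_of_lt hj'
      simp [bitsM, h1, h2, Function.comp_def]

theorem nodup_bkeys (n : Nat) : ((bkeys n).map String.ofList).Nodup := by
  rw [bkeys_eq, List.map_map]
  refine List.Nodup.map_on ?_ (List.nodup_range)
  intro a ha b hb h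
  have ha' : a < 2 ^ n := List.mem_range.mp ha
  have hb' : b < 2 ^ n := List.mem_range.mp hb
  have h' : bitsM n a = bitsM n b := by
    have := congrArg String.toList h
    simpa using this
  have := congrArg binVal h'
  rwa [binVal_bitsM n a ha', binVal_bitsM n b hb'] at this

-- the keys written by A's loop
def padKeys (nbody : Int) : List String :=
  (PySem.List.pyRange 0 ((2 : Int) ^ nbody.toNat) 1).map (fun it => padbin it nbody)

theorem nodup_padKeys (nbody : Int) : (padKeys nbody).Nodup := by
  unfold padKeys
  refine List.Nodup.map_on ?_ (PySem.List.nodup_pyRange_one 0 _)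
  intro a ha b hb h
  rw [PySem.List.mem_pyRange_one] at ha hb
  exact padbin_inj ha.1 hb.1 nbody h

theorem padbin_eq_bitsM (nbody : Int) (hn : 1 ≤ nbody) (i : Nat) (hi : i < 2 ^ nbody.toNat) :
    padbin (i : Int) nbody = String.ofList (bitsM nbody.toNat i) := by
  unfold padbin
  refine congrArg String.ofList ?_
  have htn : 1 ≤ nbody.toNat := by omega
  have hti : (Int.toNat (i : Int)) = i := Int.toNat_natCast i
  rw [hti]
  have hle : (natToBin i).length ≤ nbody.toNat := natToBin_length_le htn hi
  refine binVal_inj _ _ ?_ (bitsM_bin _ i) ?_ ?_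
  · intro c hc
    rcases List.mem_append.mp hc with hc | hc
    · left; exact (List.eq_of_mem_replicate hc)
    · exact natToBin_bin i c hc
  · rw [List.length_append, List.length_replicate, length_bitsM]
    omega
  · rw [binVal_replicate_append, binVal_natToBin, binVal_bitsM _ i hi]

theorem padKeys_eq (nbody : Int) (hn : 1 ≤ nbody) :
    padKeys nbody = (bkeys nbody.toNat).map String.ofList := by
  unfold padKeys
  rw [PySem.List.pyRange_one, bkeys_eq, List.map_map, List.map_map]
  have hcast : ((2 : Int) ^ nbody.toNat - 0).toNat = 2 ^ nbody.toNat := by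
    rw [sub_zero, show ((2 : Int) ^ nbody.toNat) = ((2 ^ nbody.toNat : Nat) : Int) by push_cast; ring]
    exact Int.toNat_natCast _
  rw [hcast]
  refine List.map_congr_left ?_
  intro i hi
  have hi' : i < 2 ^ nbody.toNat := List.mem_range.mp hi
  show padbin (0 + (i : Int)) nbody = String.ofList (bitsM nbody.toNat i)
  rw [zero_add]
  exact padbin_eq_bitsM nbody hn i hi'

-- a fresh-key insert loop over padKeys, from the empty dict, is a map
theorem fresh_fold (nbody : Int) (v : String → Int) :
    (PySem.List.pyRange 0 ((2 : Int) ^ nbody.toNat) 1).foldl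
        (fun acc it => acc.insert (padbin it nbody) (v (padbin it nbody))) PySem.Dict.empty
      = PySem.Dict.mk ((padKeys nbody).map (fun k => (k, v k))) := by
  apply PySem.Dict.ext
  rw [PySem.Dict.items_foldl_insert_fresh _ (fun it => padbin it nbody)
        (fun it => v (padbin it nbody)) _ (fun a _ => by simp [PySem.Dict.contains_empty])
        (nodup_padKeys nbody)]
  · unfold padKeys
    simp [List.map_map, Function.comp_def]
    rfl

theorem A_char (counts : List (String × Int)) (nbody : Int) :
    circjob_count_nq counts nbody
      = (padKeys nbody).map (fun k => (k, (PySem.Dict.mk counts).getD k 0)) := by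
  show (List.foldl
      (fun acc it =>
        let A := padbin it nbody
        if (PySem.Dict.mk counts).contains A then
          acc.insert A ((PySem.Dict.mk counts).getD A 0)
        else acc.insert A 0)
      PySem.Dict.empty (PySem.List.pyRange 0 ((2 : Int) ^ nbody.toNat) 1)).items = _
  have hA : (fun (acc : PySem.Dict String Int) it =>
        let A := padbin it nbody
        if (PySem.Dict.mk counts).contains A then
          acc.insert A ((PySem.Dict.mk counts).getD A 0)
        else acc.insert A 0)
      = (fun acc it => acc.insert (padbin it nbody)
          ((PySem.Dict.mk counts).getD (padbin it nbody) 0)) := by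
    funext acc it
    by_cases h : (PySem.Dict.mk counts).contains (padbin it nbody)
    · simp [h]
    · simp only [Bool.not_eq_true] at h
      simp [h, PySem.Dict.getD_of_not_contains _ _ h]
  rw [hA, fresh_fold nbody (fun k => (PySem.Dict.mk counts).getD k 0)]

theorem B_char (counts : List (String × Int)) (nbody : Int) :
    circjob_count_nq_alt counts nbody
      = ((bkeys nbody.toNat).map String.ofList).map
          (fun k => (k, (PySem.Dict.mk counts).getD k 0)) := by
  show ((bkeys nbody.toNat).foldl
      (fun acc k => acc.insert (String.ofList k) ((PySem.Dict.mk counts).getD (String.ofList k) 0))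
      PySem.Dict.empty).items = _
  rw [PySem.Dict.items_foldl_insert_fresh _ String.ofList
        (fun k => (PySem.Dict.mk counts).getD (String.ofList k) 0) _
        (fun a _ => by simp [PySem.Dict.contains_empty]) (nodup_bkeys nbody.toNat)]
  · simp [PySem.Dict.empty, List.map_map, Function.comp_def]

-- ===== VERDICT (by name: the statement is the Claim_ definition above) =====
theorem circjob_count_nq_spec : Claim_unchanged_circjob_count_nq := by
  intro counts nbody _ hpre
  intro hnd
  have hn : 1 ≤ nbody := by
    unfold Pre_circjob_count_nq at hpre
    unfold D_circjob_count_nq at hnd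
    omega
  rw [A_char, B_char, padKeys_eq nbody hn]

theorem circjob_count_nq_changed : Claim_changed_circjob_count_nq := by
  unfold Claim_changed_circjob_count_nq; decide

theorem circjob_count_nq_tight : Claim_exact_circjob_count_nq := by
  intro counts nbody _ _ hD
  unfold D_circjob_count_nq at hD
  subst hD
  rw [A_char, B_char]
  have h1 : padKeys 0 = ["0"] := by decide
  have h2 : bkeys (Int.toNat 0) = [([] : List Char)] := rfl
  rw [h1, h2]
  intro h
  simp only [List.map_cons, List.map_nil, List.cons.injEq, Prod.mk.injEq] at h
  exact absurd h.1.1 (by decide)
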